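-- pv_equiv track=rewrite | github.com/rahilshah0409/unsupervised-learning-labelling-function | waterWorldExperiment/tools.py | compare_changes_in_events
-- ===== SOURCE A (Python) =====
-- def convert_obs_set_to_str(obs):
--     if obs == {'r', 'g'}:
--         return "Both red and green"
--     elif 'r' in obs:
--         return "Red"
--     elif 'g' in obs:
--         return "Green"
--     else:
--         return "None"
--
-- def compare_changes_in_events(events_pred, events_from_env, ep_durations):
--     succ_trace_index = 0
--     state_index_in_trace = 0
--     label_index = 0
--     num_succ_traces = len(ep_durations)
--     events_from_env = list(map(convert_obs_set_to_str, events_from_env))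
--
--     last_event_from_env = events_from_env[label_index]
--     last_cluster_label = events_pred[label_index]
--
--     changes_in_clusters = []
--     changes_in_env_events = []
--     while succ_trace_index < num_succ_traces:
--         curr_cluster_label = events_pred[label_index]
--         curr_event_from_env = events_from_env[label_index]
--         if last_event_from_env != curr_event_from_env:
--             changes_in_env_events.append((succ_trace_index, state_index_in_trace, last_event_from_env, curr_event_from_env))
--         if last_cluster_label != curr_cluster_label:
--             changes_in_clusters.append((succ_trace_index, state_index_in_trace, last_cluster_label, curr_cluster_label))
--         state_index_in_trace += 1
--         label_index += 1
--         last_event_from_env = curr_event_from_env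
--         last_cluster_label = curr_cluster_label
--         if state_index_in_trace >= ep_durations[succ_trace_index]:
--             succ_trace_index += 1
--             state_index_in_trace = 0
--             if succ_trace_index < num_succ_traces:
--                 last_event_from_env = events_from_env[label_index]
--                 last_cluster_label = events_pred[label_index]
--
--     return changes_in_clusters, changes_in_env_events
-- ===== SOURCE B (Python) =====
-- # B: per-episode slicing with adjacent-pair comprehensions instead of A's single
-- # manually-indexed while loop (objective: simpler decomposition, same cost).
-- def convert_obs_set_to_str(obs):
--     if obs == {'r', 'g'}:
--         return "Both red and green"
--     elif 'r' in obs: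
--         return "Red"
--     elif 'g' in obs:
--         return "Green"
--     else:
--         return "None"
--
-- def compare_changes_in_events(events_pred, events_from_env, ep_durations):
--     labels = [convert_obs_set_to_str(o) for o in events_from_env]
--     changes_in_clusters = []
--     changes_in_env_events = []
--     start = 0
--     for i, d in enumerate(ep_durations):
--         n = max(d, 1)  # an episode always covers at least one state (as in A's do-while)
--         seg_c = events_pred[start:start + n]
--         seg_e = labels[start:start + n]
--         changes_in_clusters.extend(
--             (i, k, a, b) for k, (a, b) in enumerate(zip(seg_c, seg_c[1:]), 1) if a != b)
--         changes_in_env_events.extend(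
--             (i, k, a, b) for k, (a, b) in enumerate(zip(seg_e, seg_e[1:]), 1) if a != b)
--         start += n
--     return changes_in_clusters, changes_in_env_events
-- ===== Notes on version B (the rewrite author's own statement) =====
-- stated objective: simpler
-- what changed: Replaces A's single manually-indexed while loop with shared trace/state/label counters and carried last-values by a per-episode decomposition: slice each episode's segment (an episode covers max(d,1) states, as in A's do-while) and emit changes from adjacent pairs via zip/enumerate comprehensions.
import Mathlib
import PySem

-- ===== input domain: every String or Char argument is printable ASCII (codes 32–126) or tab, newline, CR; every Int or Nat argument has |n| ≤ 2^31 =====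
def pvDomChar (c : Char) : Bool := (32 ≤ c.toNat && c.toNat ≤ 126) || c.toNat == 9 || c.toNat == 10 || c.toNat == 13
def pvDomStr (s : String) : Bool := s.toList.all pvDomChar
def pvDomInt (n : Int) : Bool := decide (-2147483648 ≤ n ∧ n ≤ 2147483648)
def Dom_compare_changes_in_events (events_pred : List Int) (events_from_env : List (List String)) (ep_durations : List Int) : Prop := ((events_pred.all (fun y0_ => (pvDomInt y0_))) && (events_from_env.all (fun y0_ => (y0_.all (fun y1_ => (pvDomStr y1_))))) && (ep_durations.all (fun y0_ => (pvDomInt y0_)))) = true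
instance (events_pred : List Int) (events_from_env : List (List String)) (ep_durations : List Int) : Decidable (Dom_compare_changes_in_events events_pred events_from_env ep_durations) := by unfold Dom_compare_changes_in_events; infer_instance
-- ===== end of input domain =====

-- B replaces A's single manually-indexed while loop by per-episode slicing with
-- adjacent-pair comprehensions (objective: simpler decomposition, same cost).

-- ===== PORT A =====
-- module helper convert_obs_set_to_str (obs is a Python set of strings)
def convert_obs_set_to_str (obs : List String) : String :=
  if PySem.Set.equal (PySem.Set.ofList obs) (PySem.Set.ofList ["r", "g"]) then "Both red and green"
  else if obs.contains "r" then "Red"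
  else if obs.contains "g" then "Green"
  else "None"

-- A's while loop; fuel is only a totality guard (one unit per iteration; the loop
-- consumes at least one label per trace, so sum(toNat)+length+1 units suffice).
def pvALoop (pred : List Int) (env : List String) (durs : List Int) :
    Nat → Nat → Nat → Nat → String → Int →
    List (Int × Int × Int × Int) → List (Int × Int × String × String) →
    (List (Int × Int × Int × Int)) × (List (Int × Int × String × String))
  | 0, _, _, _, _, _, cc, ce => (cc, ce)
  | fuel + 1, trace, state, label, lastE, lastC, cc, ce =>
    if trace < durs.length then
      let currC := PySem.List.pyGetD pred ((label : Nat) : Int) 0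
      let currE := PySem.List.pyGetD env ((label : Nat) : Int) ""
      let ce' := if lastE ≠ currE then ce ++ [((trace : Int), (state : Int), lastE, currE)] else ce
      let cc' := if lastC ≠ currC then cc ++ [((trace : Int), (state : Int), lastC, currC)] else cc
      if PySem.List.pyGetD durs ((trace : Nat) : Int) 0 ≤ ((state + 1 : Nat) : Int) then
        if trace + 1 < durs.length then
          pvALoop pred env durs fuel (trace + 1) 0 (label + 1)
            (PySem.List.pyGetD env ((label + 1 : Nat) : Int) "")
            (PySem.List.pyGetD pred ((label + 1 : Nat) : Int) 0) cc' ce'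
        else
          pvALoop pred env durs fuel (trace + 1) 0 (label + 1) currE currC cc' ce'
      else
        pvALoop pred env durs fuel trace (state + 1) (label + 1) currE currC cc' ce'
    else (cc, ce)

def compare_changes_in_events (events_pred : List Int) (events_from_env : List (List String)) (ep_durations : List Int) : (List (Int × Int × Int × Int)) × (List (Int × Int × String × String)) :=
  let env := events_from_env.map convert_obs_set_to_str
  let lastE := PySem.List.pyGetD env 0 ""
  let lastC := PySem.List.pyGetD events_pred 0 0
  pvALoop events_pred env ep_durations
    ((ep_durations.map Int.toNat).sum + ep_durations.length + 1) 0 0 0 lastE lastC [] []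

-- ===== PORT B =====
-- (i, k, a, b) for k, (a, b) in enumerate(zip(seg, seg[1:]), 1) if a != b
def pvSegChanges {α : Type} [DecidableEq α] (i : Int) (seg : List α) : List (Int × Int × α × α) :=
  (PySem.List.enumerate (seg.zip (PySem.List.slice seg (some 1) none)) 1).filterMap
    (fun p => if p.2.1 ≠ p.2.2 then some (i, p.1, p.2.1, p.2.2) else none)

def compare_changes_in_events_alt (events_pred : List Int) (events_from_env : List (List String)) (ep_durations : List Int) : (List (Int × Int × Int × Int)) × (List (Int × Int × String × String)) :=
  let labels := events_from_env.map convert_obs_set_to_str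
  let res := (PySem.List.enumerate ep_durations 0).foldl
    (fun (acc : (List (Int × Int × Int × Int)) × (List (Int × Int × String × String)) × Int) p =>
      let start := acc.2.2
      let n := max p.2 1
      let segC := PySem.List.slice events_pred (some start) (some (start + n))
      let segE := PySem.List.slice labels (some start) (some (start + n))
      (acc.1 ++ pvSegChanges p.1 segC, acc.2.1 ++ pvSegChanges p.1 segE, start + n))
    ([], [], 0)
  (res.1, res.2.1)

-- ===== PRECONDITION & SPEC =====
-- Pre_ is exactly A's returning domain: both event lists must be long enough for every
-- state A reads (one per episode state, at least one per episode, and always index 0);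
-- otherwise A raises IndexError, including on empty event lists.
def Pre_compare_changes_in_events (events_pred : List Int) (events_from_env : List (List String)) (ep_durations : List Int) : Prop :=
  max (ep_durations.map (fun d => (max d 1).toNat)).sum 1 ≤ events_pred.length ∧
  max (ep_durations.map (fun d => (max d 1).toNat)).sum 1 ≤ events_from_env.length
instance (events_pred : List Int) (events_from_env : List (List String)) (ep_durations : List Int) : Decidable (Pre_compare_changes_in_events events_pred events_from_env ep_durations) := by unfold Pre_compare_changes_in_events; infer_instance

def pvWitness_compare_changes_in_events : List Int × List (List String) × List Int :=
  ([1, 1, 2], [["r"], ["r"], ["g"]], [1, 2])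

def Spec_compare_changes_in_events (events_pred : List Int) (events_from_env : List (List String)) (ep_durations : List Int) (out : (List (Int × Int × Int × Int)) × (List (Int × Int × String × String))) : Prop := out = compare_changes_in_events_alt events_pred events_from_env ep_durations
instance (events_pred : List Int) (events_from_env : List (List String)) (ep_durations : List Int) (out : (List (Int × Int × Int × Int)) × (List (Int × Int × String × String))) : Decidable (Spec_compare_changes_in_events events_pred events_from_env ep_durations out) := by unfold Spec_compare_changes_in_events; infer_instance

-- ===== CLAIM (what is proved, stated in full; the proofs are below) =====
def Claim_equal_compare_changes_in_events : Prop := ∀ (events_pred : List Int) (events_from_env : List (List String)) (ep_durations : List Int), Dom_compare_changes_in_events events_pred events_from_env ep_durations → Pre_compare_changes_in_events events_pred events_from_env ep_durations → Spec_compare_changes_in_events events_pred events_from_env ep_durations (compare_changes_in_events events_pred events_from_env ep_durations)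

-- ===== LEMMAS AND PROOFS =====

-- sum of durations, as a Nat
def pvSumN (durs : List Int) : Nat := (durs.map (fun d => (max d 1).toNat)).sum

-- the common specification: per-episode segments, adjacent-pair changes
def pvSpecRec (pred : List Int) (env : List String) : Nat → Nat → List Int →
    (List (Int × Int × Int × Int)) × (List (Int × Int × String × String))
  | _, _, [] => ([], [])
  | t, s, d :: rest =>
    let r := pvSpecRec pred env (t + 1) (s + (max d 1).toNat) rest
    (pvSegChanges (t : Int) ((pred.drop s).take (max d 1).toNat) ++ r.1,
     pvSegChanges (t : Int) ((env.drop s).take (max d 1).toNat) ++ r.2)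

-- pvSegChanges, rephrased as structural recursion on the segment
def pvPairChanges {α : Type} [DecidableEq α] (t : Int) : Int → List α → List (Int × Int × α × α)
  | k, a :: b :: rest => (if a ≠ b then [(t, k, a, b)] else []) ++ pvPairChanges t (k + 1) (b :: rest)
  | _, _ => []

theorem pvSegChanges_eq_pair {α : Type} [DecidableEq α] (t : Int) (seg : List α) (k : Int) :
    (PySem.List.enumerate (seg.zip (PySem.List.slice seg (some 1) none)) k).filterMap
      (fun p => if p.2.1 ≠ p.2.2 then some (t, p.1, p.2.1, p.2.2) else none)
    = pvPairChanges t k seg := by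
  induction seg generalizing k with
  | nil => simp [pvPairChanges, PySem.List.slice_from_one]
  | cons a rest ih =>
    cases rest with
    | nil => simp [pvPairChanges, PySem.List.slice_from_one]
    | cons b rest' =>
      simp only [PySem.List.slice_from_one, List.tail_cons] at ih ⊢
      simp only [List.zip_cons_cons, PySem.List.enumerate_cons, List.filterMap_cons]
      rw [ih (k + 1)]
      by_cases h : a = b <;> simp [pvPairChanges, h]

theorem pvSegChanges_eq_pair_one {α : Type} [DecidableEq α] (t : Int) (seg : List α) :
    pvSegChanges t seg = pvPairChanges t 1 seg := by
  unfold pvSegChanges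
  exact pvSegChanges_eq_pair t seg 1

theorem pvDrop_getD {α : Type} (xs : List α) (t : Nat) (d d0 : α) (rest : List α)
    (h : xs.drop t = d :: rest) : xs.getD t d0 = d := by
  have h0 : xs[t]? = some d := by
    have := List.getElem?_drop (xs := xs) (i := t) (j := 0)
    rw [h] at this
    simpa using this.symm
  simp [List.getD_eq_getElem?_getD, h0]

theorem pvDrop_lt {α : Type} (xs : List α) (t : Nat) (d : α) (rest : List α)
    (h : xs.drop t = d :: rest) : t < xs.length := by
  have := congrArg List.length h
  simp at this
  omega

theorem pvDrop_succ {α : Type} (xs : List α) (t : Nat) (d : α) (rest : List α)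
    (h : xs.drop t = d :: rest) : xs.drop (t + 1) = rest := by
  have h2 : xs.drop (t + 1) = (xs.drop t).drop 1 := by
    rw [List.drop_drop]
  rw [h2, h, List.drop_one, List.tail_cons]

theorem pvTakeDropHead {α : Type} (xs : List α) (i m : Nat) (d : α) (h : i < xs.length) :
    (xs.drop i).take (m + 1) = xs.getD i d :: (xs.drop (i + 1)).take m := by
  rw [List.drop_eq_getElem_cons h, List.take_succ_cons, List.getD_eq_getElem _ _ h]

theorem pvALoop_dead (pred : List Int) (env : List String) (durs : List Int)
    (fuel trace state label : Nat) (lE : String) (lC : Int) (cc : List (Int × Int × Int × Int))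
    (ce : List (Int × Int × String × String)) (h : durs.length ≤ trace) :
    pvALoop pred env durs fuel trace state label lE lC cc ce = (cc, ce) := by
  cases fuel with
  | zero => simp [pvALoop]
  | succ f => simp [pvALoop, Nat.not_lt.mpr h]

-- main A-side invariant, by induction on fuel:
-- P1: at the start of trace t (state 0, seeded last values);
-- P2: mid-trace at state j ≥ 1 (last values are the previous state's).
theorem pvALoop_main (pred : List Int) (env : List String) (durs : List Int) (fuel : Nat) :
    (∀ (rest : List Int) (t s : Nat) (cc : List (Int × Int × Int × Int))
        (ce : List (Int × Int × String × String)),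
      durs.drop t = rest →
      s + pvSumN rest ≤ pred.length → s + pvSumN rest ≤ env.length →
      pvSumN rest ≤ fuel →
      pvALoop pred env durs fuel t 0 s (env.getD s "") (pred.getD s 0) cc ce
        = (cc ++ (pvSpecRec pred env t s rest).1, ce ++ (pvSpecRec pred env t s rest).2)) ∧
    (∀ (d : Int) (rest' : List Int) (t s j : Nat) (cc : List (Int × Int × Int × Int))
        (ce : List (Int × Int × String × String)),
      durs.drop t = d :: rest' →
      1 ≤ j → j < (max d 1).toNat →
      s + (max d 1).toNat + pvSumN rest' ≤ pred.length → s + (max d 1).toNat + pvSumN rest' ≤ env.length →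
      ((max d 1).toNat - j) + pvSumN rest' ≤ fuel →
      pvALoop pred env durs fuel t j (s + j) (env.getD (s + j - 1) "") (pred.getD (s + j - 1) 0) cc ce
        = (cc ++ pvPairChanges (t : Int) (j : Int) ((pred.drop (s + j - 1)).take ((max d 1).toNat - j + 1))
              ++ (pvSpecRec pred env (t + 1) (s + (max d 1).toNat) rest').1,
           ce ++ pvPairChanges (t : Int) (j : Int) ((env.drop (s + j - 1)).take ((max d 1).toNat - j + 1))
              ++ (pvSpecRec pred env (t + 1) (s + (max d 1).toNat) rest').2)) := by
  induction fuel with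
  | zero =>
    constructor
    · intro rest t s cc ce hdrop _hbp _hbe hfuel
      cases rest with
      | nil =>
        have hlen : durs.length ≤ t := by
          have := congrArg List.length hdrop
          simp at this
          omega
        rw [pvALoop_dead _ _ _ _ _ _ _ _ _ _ _ hlen]
        simp [pvSpecRec]
      | cons d rest' =>
        exfalso
        have h1 : 1 ≤ (max d 1).toNat := by omega
        have h2 : pvSumN (d :: rest') = (max d 1).toNat + pvSumN rest' := by simp [pvSumN]
        omega
    · intro d rest' t s j cc ce _hdrop _hj hjd _hbp _hbe hfuel
      exfalso
      omega
  | succ f ih =>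
    constructor
    · -- P1: start of trace t
      intro rest t s cc ce hdrop hbp hbe hfuel
      cases rest with
      | nil =>
        have hlen : durs.length ≤ t := by
          have := congrArg List.length hdrop
          simp at this
          omega
        rw [pvALoop_dead _ _ _ _ _ _ _ _ _ _ _ hlen]
        simp [pvSpecRec]
      | cons d rest' =>
        have hdn : 1 ≤ (max d 1).toNat := by omega
        have ht : t < durs.length := pvDrop_lt durs t d rest' hdrop
        have hdt : durs.getD t 0 = d := pvDrop_getD durs t d 0 rest' hdrop
        have hdrop' : durs.drop (t + 1) = rest' := pvDrop_succ durs t d rest' hdrop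
        have hsum : pvSumN (d :: rest') = (max d 1).toNat + pvSumN rest' := by simp [pvSumN]
        rw [hsum] at hbp hbe hfuel
        have hslp : s < pred.length := by omega
        have hsle : s < env.length := by omega
        simp only [pvALoop, if_pos ht, PySem.List.pyGetD_natCast, hdt, ne_eq,
          not_true_eq_false, if_false, Nat.zero_add]
        by_cases hone : (max d 1).toNat = 1
        · have hcond : d ≤ ((0 + 1 : Nat) : Int) := by omega
          rw [if_pos hcond]
          have hseg1 : ∀ {β : Type} (ys : List β) (d0 : β), s < ys.length →
              (ys.drop s).take 1 = [ys.getD s d0] := by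
            intro β ys d0 hy
            have := pvTakeDropHead ys s 0 d0 hy
            simpa using this
          by_cases htt : t + 1 < durs.length
          · rw [if_pos htt]
            have := (ih.1) rest' (t + 1) (s + 1) cc ce hdrop'
              (by omega) (by omega) (by omega)
            rw [this]
            simp only [pvSpecRec, hone]
            simp only [hseg1 pred 0 hslp, hseg1 env "" hsle]
            simp [pvSegChanges, PySem.List.slice_from_one]
          · rw [if_neg htt]
            have hrest' : rest' = [] := by
              rw [← hdrop']
              exact List.drop_eq_nil_of_le (by omega)
            subst hrest'
            rw [pvALoop_dead _ _ _ _ _ _ _ _ _ _ _ (by omega)]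
            simp only [pvSpecRec, hone]
            simp only [hseg1 pred 0 hslp, hseg1 env "" hsle]
            simp [pvSegChanges, PySem.List.slice_from_one]
        · have hcond : ¬ (d ≤ ((0 + 1 : Nat) : Int)) := by omega
          rw [if_neg hcond]
          have hsj : s + 1 - 1 = s := by omega
          have := (ih.2) d rest' t s 1 cc ce hdrop
            (by omega) (by omega) (by omega) (by omega) (by omega)
          rw [hsj] at this
          rw [this]
          have htk : (max d 1).toNat - 1 + 1 = (max d 1).toNat := by omega
          rw [htk]
          simp [pvSpecRec, pvSegChanges_eq_pair_one]
    · -- P2: mid-trace, state j ≥ 1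
      intro d rest' t s j cc ce hdrop hj hjd hbp hbe hfuel
      have ht : t < durs.length := pvDrop_lt durs t d rest' hdrop
      have hdt : durs.getD t 0 = d := pvDrop_getD durs t d 0 rest' hdrop
      have hdrop' : durs.drop (t + 1) = rest' := pvDrop_succ durs t d rest' hdrop
      have hsjp : s + j < pred.length := by omega
      have hsje : s + j < env.length := by omega
      have hsucc : s + j - 1 + 1 = s + j := by omega
      have e1 : ∀ {β : Type} (ys : List β) (d0 : β), s + j < ys.length →
          (ys.drop (s + j - 1)).take ((max d 1).toNat - j + 1)
            = ys.getD (s + j - 1) d0 :: (ys.drop (s + j)).take ((max d 1).toNat - j) := by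
        intro β ys d0 hy
        rw [pvTakeDropHead ys (s + j - 1) ((max d 1).toNat - j) d0 (by omega), hsucc]
      have e2 : ∀ {β : Type} (ys : List β) (d0 : β), s + j < ys.length →
          (ys.drop (s + j)).take ((max d 1).toNat - j)
            = ys.getD (s + j) d0 :: (ys.drop (s + j + 1)).take ((max d 1).toNat - j - 1) := by
        intro β ys d0 hy
        have hm : (max d 1).toNat - j = ((max d 1).toNat - j - 1) + 1 := by omega
        rw [hm, pvTakeDropHead ys (s + j) ((max d 1).toNat - j - 1) d0 hy]
        simp
      simp only [pvALoop, if_pos ht, PySem.List.pyGetD_natCast, hdt]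
      rw [e1 pred 0 hsjp, e2 pred 0 hsjp, e1 env "" hsje, e2 env "" hsje]
      simp only [pvPairChanges]
      by_cases hlast : (max d 1).toNat = j + 1
      · have hcond : d ≤ ((j + 1 : Nat) : Int) := by omega
        rw [if_pos hcond]
        have hsd : s + j + 1 = s + (max d 1).toNat := by omega
        have htk0 : (max d 1).toNat - j - 1 = 0 := by omega
        by_cases htt : t + 1 < durs.length
        · rw [if_pos htt]
          by_cases hcp : pred.getD (s + j - 1) 0 = pred.getD (s + j) 0 <;>
            by_cases hce : env.getD (s + j - 1) "" = env.getD (s + j) "" <;>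
            · simp only [ne_eq, hcp, hce, not_true_eq_false, not_false_eq_true,
                if_true, if_false, hsd]
              rw [(ih.1) rest' (t + 1) (s + (max d 1).toNat) _ _ hdrop'
                (by omega) (by omega) (by omega)]
              simp [pvPairChanges, htk0]
        · rw [if_neg htt]
          have hrest' : rest' = [] := by
            rw [← hdrop']
            exact List.drop_eq_nil_of_le (by omega)
          subst hrest'
          rw [pvALoop_dead _ _ _ _ _ _ _ _ _ _ _ (by omega)]
          simp [pvSpecRec, pvPairChanges, htk0]
          split_ifs <;> simp
      · have hcond : ¬ (d ≤ ((j + 1 : Nat) : Int)) := by omega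
        rw [if_neg hcond]
        have hsjj : s + j + 1 - 1 = s + j := by omega
        have hadd : s + (j + 1) = s + j + 1 := by omega
        have htk : (max d 1).toNat - (j + 1) + 1 = (max d 1).toNat - j := by omega
        have hcast : ((j : Int) + 1) = ((j + 1 : Nat) : Int) := by push_cast; ring
        have hrec := fun cc' ce' => (ih.2) d rest' t s (j + 1) cc' ce' hdrop
          (by omega) (by omega) (by omega) (by omega) (by omega)
        simp only [hsjj, hadd, htk, e2 pred 0 hsjp, e2 env "" hsje] at hrec
        rw [hcast]
        by_cases hcp : pred.getD (s + j - 1) 0 = pred.getD (s + j) 0 <;>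
          by_cases hce : env.getD (s + j - 1) "" = env.getD (s + j) "" <;>
          · simp only [ne_eq, hcp, hce, not_true_eq_false, not_false_eq_true,
              if_true, if_false]
            rw [hrec]
            simp

-- B-side: the fold over enumerate computes pvSpecRec
theorem pvB_fold (pred : List Int) (env : List String) :
    ∀ (durs : List Int) (t s : Nat) (cc : List (Int × Int × Int × Int))
      (ce : List (Int × Int × String × String)),
      (PySem.List.enumerate durs (t : Int)).foldl
        (fun (acc : (List (Int × Int × Int × Int)) × (List (Int × Int × String × String)) × Int) p =>
          let start := acc.2.2
          let n := max p.2 1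
          let segC := PySem.List.slice pred (some start) (some (start + n))
          let segE := PySem.List.slice env (some start) (some (start + n))
          (acc.1 ++ pvSegChanges p.1 segC, acc.2.1 ++ pvSegChanges p.1 segE, start + n))
        (cc, ce, (s : Int))
      = (cc ++ (pvSpecRec pred env t s durs).1, ce ++ (pvSpecRec pred env t s durs).2,
         ((s + pvSumN durs : Nat) : Int)) := by
  intro durs
  induction durs with
  | nil => intro t s cc ce; simp [pvSpecRec, pvSumN]
  | cons d rest ih =>
    intro t s cc ce
    have hdn : ((s : Int) + max d 1) = ((s + (max d 1).toNat : Nat) : Int) := by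
      push_cast [Int.toNat_of_nonneg (by omega : (0:Int) ≤ max d 1)]; ring
    have ht : ((t : Int) + 1) = ((t + 1 : Nat) : Int) := by push_cast; ring
    simp only [PySem.List.enumerate_cons, List.foldl_cons]
    rw [hdn, ht, PySem.List.slice_natCast, PySem.List.slice_natCast,
      ih (t + 1) (s + (max d 1).toNat)]
    have hsub : s + (max d 1).toNat - s = (max d 1).toNat := by omega
    simp [pvSpecRec, pvSumN, hsub, Nat.add_assoc]

-- ===== VERDICT (by name: the statement is the Claim_ definition above) =====
theorem compare_changes_in_events_spec : Claim_equal_compare_changes_in_events := by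
  intro pred envs durs _hdom hpre
  obtain ⟨hbp, hbe⟩ := hpre
  unfold Spec_compare_changes_in_events
  simp only [compare_changes_in_events, compare_changes_in_events_alt]
  have hfuel : pvSumN durs ≤ (durs.map Int.toNat).sum + durs.length + 1 := by
    have key : ∀ l : List Int,
        (l.map (fun d => (max d 1).toNat)).sum ≤ (l.map Int.toNat).sum + l.length := by
      intro l
      induction l with
      | nil => simp
      | cons d rest ih => simp only [List.map_cons, List.sum_cons, List.length_cons]; omega
    have := key durs
    simp only [pvSumN]
    omega
  have hA := (pvALoop_main pred (envs.map convert_obs_set_to_str) durs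
      ((durs.map Int.toNat).sum + durs.length + 1)).1 durs 0 0 [] []
      (List.drop_zero) (by simp only [pvSumN]; omega) (by simp only [pvSumN, List.length_map] at hbe ⊢; omega)
      hfuel
  have hB := pvB_fold pred (envs.map convert_obs_set_to_str) durs 0 0 [] []
  simp only [Nat.cast_zero, Nat.zero_add, List.nil_append] at hA hB
  rw [PySem.List.pyGetD_zero, PySem.List.pyGetD_zero, hA, hB]
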